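-- pv_equiv track=rewrite | github.com/wellqin/USTC | Interview/美团/20200319.py | func
-- ===== SOURCE A (Python) =====
-- import heapq
--
-- def func(s, k, G):
--     queue = []
--     heapq.heappush(queue, (0, s))  # 出发点
--
--     used = set()
--     dist = {s: 0}
--     res = 0
--
--     while queue:
--         dis, node = heapq.heappop(queue)
--         if node > k:
--             break
--         used.add(node)
--         if node not in G.keys():
--             continue
--
--         for i, j in G[node].items():
--             newDist = dis + j
--             if (i not in dist) or (newDist < dist[i]):
--                 dist[i] = newDist
--                 heapq.heappush(queue, (newDist, i))
--                 res += 1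
--     return res
-- ===== SOURCE B (Python) =====
-- def func(s, k, G):
--     pending = [(0, s)]
--     dist = {s: 0}
--     res = 0
--     while pending:
--         dis, node = min(pending)
--         pending.remove((dis, node))
--         if node > k:
--             break
--         for i, j in G.get(node, {}).items():
--             nd = dis + j
--             # default nd + 1 makes the test succeed exactly when i is unseen or nd improves
--             if nd < dist.get(i, nd + 1):
--                 dist[i] = nd
--                 pending.append((nd, i))
--                 res += 1
--     return res
-- ===== Notes on version B (the rewrite author's own statement) =====
-- stated objective: simpler
-- what changed: Replaces the heapq binary heap with a plain unsorted list queried with the builtin min() and list.remove(), replaces the keys()/[] dict access with G.get(node, {}) and the two-part membership-or-improvement test with a single dist.get(i, nd + 1) comparison, and drops the dead `used` set.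
import Mathlib
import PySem

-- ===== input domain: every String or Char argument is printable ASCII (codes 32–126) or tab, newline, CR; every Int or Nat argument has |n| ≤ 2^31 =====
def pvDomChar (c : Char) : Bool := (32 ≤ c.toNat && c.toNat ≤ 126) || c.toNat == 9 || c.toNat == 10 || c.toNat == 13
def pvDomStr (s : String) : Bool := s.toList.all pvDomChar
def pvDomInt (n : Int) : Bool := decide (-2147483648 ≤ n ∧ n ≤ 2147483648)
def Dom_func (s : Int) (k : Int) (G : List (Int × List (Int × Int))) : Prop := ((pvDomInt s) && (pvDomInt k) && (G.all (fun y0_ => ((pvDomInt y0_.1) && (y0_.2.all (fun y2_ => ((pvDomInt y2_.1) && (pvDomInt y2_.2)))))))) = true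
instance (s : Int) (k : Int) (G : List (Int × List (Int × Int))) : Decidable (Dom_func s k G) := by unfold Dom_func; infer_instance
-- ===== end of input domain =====

-- B replaces the heapq priority queue with a plain unsorted list queried with min()/list.remove(),
-- uses G.get(node, {}) and a single dist.get(i, nd + 1) improvement test, and drops the dead
-- `used` set: simpler, no speed claimed. Both while-loops are ported with the same fuel, a fixed
-- iteration cap of 2^40 (the loop exits as soon as its queue empties, so the cap only limits the
-- NUMBER OF ITERATIONS, never the input size; a Python run that returns in observable time pops
-- far fewer than 2^40 entries — only a run the Python never finishes, e.g. pumping a reachable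
-- negative cycle, would hit the cap). The ports are proved lockstep-equal for ANY fuel.

-- ===== PORT A =====
-- Python tuple order (dis, node) <= : lexicographic
def pvLeB (a b : Int × Int) : Bool := decide (a.1 < b.1) || (a.1 == b.1 && decide (a.2 ≤ b.2))

-- heapq modelled as a list kept sorted by tuple order: heappush = ordered insert, heappop = head
def pvPush (x : Int × Int) : List (Int × Int) → List (Int × Int)
  | [] => [x]
  | y :: ys => if pvLeB x y then x :: y :: ys else y :: pvPush x ys

-- `node in G.keys()` / `G[node]` on the association-list dict (unique keys under Pre_func)
def pvAdj : List (Int × List (Int × Int)) → Int → Option (List (Int × Int))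
  | [], _ => none
  | (n, adj) :: rest, node => if n == node then some adj else pvAdj rest node

-- fuel: the fixed iteration cap shared by both loop ports (see the header comment)
def pvFuel : Nat := 1099511627776

-- the inner `for i, j in G[node].items()` loop of A
def pvRelaxA (dis : Int) : List (Int × Int) → PySem.Dict Int Int → List (Int × Int) → Int →
    PySem.Dict Int Int × List (Int × Int) × Int
  | [], dist, queue, res => (dist, queue, res)
  | (i, j) :: adj, dist, queue, res =>
    let newDist := dis + j
    match PySem.Dict.get? dist i with
    | none => pvRelaxA dis adj (PySem.Dict.insert dist i newDist) (pvPush (newDist, i) queue) (res + 1)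
    | some d =>
      if newDist < d then
        pvRelaxA dis adj (PySem.Dict.insert dist i newDist) (pvPush (newDist, i) queue) (res + 1)
      else pvRelaxA dis adj dist queue res

-- the while-loop, by structural recursion on the fuel (the loop exits as soon as the queue
-- empties, so the huge fuel constant is never walked down on a terminating run)
def pvLoopA (k : Int) (G : List (Int × List (Int × Int))) :
    Nat → List (Int × Int) → PySem.Set Int → PySem.Dict Int Int → Int → Int
  | 0, _, _, _, res => res
  | fuel + 1, queue, used, dist, res =>
    match queue with
    | [] => res
    | (dis, node) :: rest =>
      if node > k then res
      else
        let used' := PySem.Set.add used node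
        match pvAdj G node with
        | none => pvLoopA k G fuel rest used' dist res
        | some adj =>
          let st := pvRelaxA dis adj dist rest res
          pvLoopA k G fuel st.2.1 used' st.1 st.2.2

def func (s : Int) (k : Int) (G : List (Int × List (Int × Int))) : Int :=
  pvLoopA k G pvFuel (pvPush (0, s) []) PySem.Set.empty (PySem.Dict.insert PySem.Dict.empty s 0) 0

-- ===== PORT B =====
-- the body of B's `for i, j in G.get(node, {}).items()` loop, folded over the adjacency list;
-- state is (dist, pending, res)
def pvStepB (dis : Int) (st : PySem.Dict Int Int × List (Int × Int) × Int) (e : Int × Int) :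
    PySem.Dict Int Int × List (Int × Int) × Int :=
  let nd := dis + e.2
  if nd < PySem.Dict.getD st.1 e.1 (nd + 1) then
    (PySem.Dict.insert st.1 e.1 nd, st.2.1 ++ [(nd, e.1)], st.2.2 + 1)
  else st

-- B's while-loop, same fuel recursion shape
def pvGoB (k : Int) (G : List (Int × List (Int × Int))) :
    Nat → List (Int × Int) → PySem.Dict Int Int → Int → Int
  | 0, _, _, res => res
  | fuel + 1, pending, dist, res =>
    -- `min(pending)`: none = empty pending, the while-condition
    match PySem.List.min2? pending (fun p => p.1) (fun p => p.2) with
    | none => res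
    | some best =>
      -- `pending.remove(best)` — best ∈ pending always, so the .getD default is never taken
      let pending' := (PySem.List.remove? pending best).getD pending
      if best.2 > k then res
      else
        let st := ((PySem.Dict.mk G).getD best.2 []).foldl (pvStepB best.1) (dist, pending', res)
        pvGoB k G fuel st.2.1 st.1 st.2.2

def func_alt (s : Int) (k : Int) (G : List (Int × List (Int × Int))) : Int :=
  pvGoB k G pvFuel [(0, s)] (PySem.Dict.insert PySem.Dict.empty s 0) 0

-- ===== SPEC =====
def Spec_func (s : Int) (k : Int) (G : List (Int × List (Int × Int))) (out : Int) : Prop := out = func_alt s k G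
instance (s : Int) (k : Int) (G : List (Int × List (Int × Int))) (out : Int) : Decidable (Spec_func s k G out) := by unfold Spec_func; infer_instance

-- ===== CLAIM (what is proved, stated in full; the proofs are below) =====
def Claim_equal_func : Prop := ∀ (s : Int) (k : Int) (G : List (Int × List (Int × Int))), Dom_func s k G → Spec_func s k G (func s k G)

-- ===== LEMMAS AND PROOFS =====

theorem pvLeB_iff (a b : Int × Int) : pvLeB a b = true ↔ (a.1 < b.1 ∨ (a.1 = b.1 ∧ a.2 ≤ b.2)) := by
  simp [pvLeB]

theorem pvLeB_refl (a : Int × Int) : pvLeB a a = true := by simp [pvLeB_iff]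

theorem pvLeB_trans {a b c : Int × Int} (h1 : pvLeB a b = true) (h2 : pvLeB b c = true) :
    pvLeB a c = true := by
  rw [pvLeB_iff] at *; omega

theorem pvLeB_antisymm {a b : Int × Int} (h1 : pvLeB a b = true) (h2 : pvLeB b a = true) :
    a = b := by
  rw [pvLeB_iff] at *
  have : a.1 = b.1 ∧ a.2 = b.2 := by omega
  exact Prod.ext this.1 this.2

theorem pvLeB_total {a b : Int × Int} (h : pvLeB a b = false) : pvLeB b a = true := by
  have h' : ¬ (a.1 < b.1 ∨ (a.1 = b.1 ∧ a.2 ≤ b.2)) := by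
    rw [← pvLeB_iff]; simp [h]
  rw [pvLeB_iff]; omega

-- sortedness predicate for A's queue
def PvSorted (l : List (Int × Int)) : Prop := l.Pairwise (fun a b => pvLeB a b = true)

theorem pvPush_perm (x : Int × Int) (l : List (Int × Int)) : List.Perm (pvPush x l) (x :: l) := by
  induction l with
  | nil => rfl
  | cons y ys ih =>
    simp only [pvPush]
    split
    · exact List.Perm.refl _
    · exact (ih.cons y).trans (List.Perm.swap x y ys)

theorem mem_pvPush {z x : Int × Int} {l : List (Int × Int)} (h : z ∈ pvPush x l) :
    z = x ∨ z ∈ l := by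
  have := (pvPush_perm x l).mem_iff.mp h
  simpa using this

theorem pvPush_sorted {x : Int × Int} {l : List (Int × Int)} (h : PvSorted l) :
    PvSorted (pvPush x l) := by
  induction l with
  | nil => simp [pvPush, PvSorted]
  | cons y ys ih =>
    rcases List.pairwise_cons.mp h with ⟨hy, hys⟩
    simp only [pvPush]
    split
    · rename_i hxy
      refine List.pairwise_cons.mpr ⟨?_, h⟩
      intro z hz
      rcases List.mem_cons.mp hz with rfl | hz
      · exact hxy
      · exact pvLeB_trans hxy (hy _ hz)
    · rename_i hxy
      have hyx : pvLeB y x = true := pvLeB_total (Bool.eq_false_iff.mpr hxy)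
      refine List.pairwise_cons.mpr ⟨?_, ih hys⟩
      intro z hz
      rcases mem_pvPush hz with rfl | hz
      · exact hyx
      · exact hy _ hz

-- min2?'s folder, named so the induction below can speak about it
def pvMinFold (acc : Option (Int × Int)) (x : Int × Int) : Option (Int × Int) :=
  match acc with
  | none => some x
  | some m =>
    if (decide (x.1 < m.1) || !decide (m.1 < x.1) && decide (x.2 < m.2)) = true then some x
    else some m

theorem pvMin2_eq_foldl (l : List (Int × Int)) :
    PySem.List.min2? l (fun q => q.1) (fun q => q.2) = l.foldl pvMinFold none := by
  unfold PySem.List.min2?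
  apply List.foldl_ext
  intro acc x _
  cases acc <;> simp [pvMinFold]

theorem pvMinFold_some (m x : Int × Int) :
    pvMinFold (some m) x = if x.1 < m.1 ∨ (x.1 = m.1 ∧ x.2 < m.2) then some x else some m := by
  dsimp only [pvMinFold]
  by_cases h : x.1 < m.1 ∨ (x.1 = m.1 ∧ x.2 < m.2)
  · rw [if_pos h, if_pos]
    simp only [Bool.or_eq_true, Bool.and_eq_true, Bool.not_eq_true', decide_eq_true_eq,
      decide_eq_false_iff_not]
    omega
  · rw [if_neg h, if_neg]
    simp only [Bool.or_eq_true, Bool.and_eq_true, Bool.not_eq_true', decide_eq_true_eq,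
      decide_eq_false_iff_not]
    omega

-- the running fold of min2? once the accumulator is `some`
theorem pvFoldMin_some (l : List (Int × Int)) (m : Int × Int) :
    ∃ m', l.foldl pvMinFold (some m) = some m' ∧ (m' = m ∨ m' ∈ l) ∧ pvLeB m' m = true ∧
      ∀ y ∈ l, pvLeB m' y = true := by
  induction l generalizing m with
  | nil => exact ⟨m, rfl, Or.inl rfl, pvLeB_refl m, by simp⟩
  | cons x xs ih =>
    simp only [List.foldl, pvMinFold_some]
    by_cases hc : (x.1 < m.1 ∨ (x.1 = m.1 ∧ x.2 < m.2))
    · rw [if_pos hc]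
      obtain ⟨m', h1, h2, h3, h4⟩ := ih x
      have hxm : pvLeB x m = true := by rw [pvLeB_iff]; omega
      refine ⟨m', h1, ?_, pvLeB_trans h3 hxm, ?_⟩
      · rcases h2 with rfl | h2
        · exact Or.inr (by simp)
        · exact Or.inr (by simp [h2])
      · intro y hy
        rcases List.mem_cons.mp hy with rfl | hy
        · exact h3
        · exact h4 y hy
    · rw [if_neg hc]
      obtain ⟨m', h1, h2, h3, h4⟩ := ih m
      have hmx : pvLeB m x = true := by rw [pvLeB_iff]; omega
      refine ⟨m', h1, ?_, h3, ?_⟩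
      · rcases h2 with rfl | h2
        · exact Or.inl rfl
        · exact Or.inr (by simp [h2])
      · intro y hy
        rcases List.mem_cons.mp hy with rfl | hy
        · exact pvLeB_trans h3 hmx
        · exact h4 y hy

-- min2? of a nonempty list is a minimal member
theorem pvMin2_min (p : Int × Int) (ps : List (Int × Int)) :
    ∃ m', PySem.List.min2? (p :: ps) (fun q => q.1) (fun q => q.2) = some m' ∧
      m' ∈ p :: ps ∧ ∀ y ∈ p :: ps, pvLeB m' y = true := by
  obtain ⟨m', h1, h2, h3, h4⟩ := pvFoldMin_some ps p
  refine ⟨m', ?_, ?_, ?_⟩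
  · rw [pvMin2_eq_foldl]
    simpa [List.foldl, pvMinFold] using h1
  · rcases h2 with rfl | h2
    · simp
    · simp [h2]
  · intro y hy
    rcases List.mem_cons.mp hy with rfl | hy
    · exact h3
    · exact h4 y hy

-- min2? of any permutation of a sorted nonempty list is the sorted head
theorem pvMin2_head {h : Int × Int} {t : List (Int × Int)} {p : Int × Int}
    {ps : List (Int × Int)} (hs : PvSorted (h :: t)) (hp : (h :: t).Perm (p :: ps)) :
    PySem.List.min2? (p :: ps) (fun q => q.1) (fun q => q.2) = some h := by
  obtain ⟨m', h1, h2, h3⟩ := pvMin2_min p ps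
  rw [h1]
  have hmem : m' ∈ h :: t := hp.symm.subset h2
  have hh : h ∈ p :: ps := hp.subset (by simp)
  have hle1 : pvLeB m' h = true := h3 h hh
  have hle2 : pvLeB h m' = true := by
    rcases List.mem_cons.mp hmem with he | hm
    · rw [he]; exact pvLeB_refl _
    · exact (List.pairwise_cons.mp hs).1 _ hm
  rw [pvLeB_antisymm hle1 hle2]

-- `pending.remove(h)` on a permutation of h :: t is a permutation of t
theorem pvRemove_perm_tail {h : Int × Int} {t : List (Int × Int)} {p : Int × Int}
    {ps : List (Int × Int)} (hp : (h :: t).Perm (p :: ps)) :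
    (PySem.List.remove? (p :: ps) h).getD (p :: ps) = (p :: ps).erase h ∧
      List.Perm t ((p :: ps).erase h) := by
  have hh : h ∈ p :: ps := hp.subset (by simp)
  constructor
  · rw [PySem.List.remove?_eq_some_erase _ h hh]; rfl
  · have := hp.erase h
    simpa using this

-- pvAdj is get? on the literal dict
theorem pvAdj_eq_get? (G : List (Int × List (Int × Int))) (node : Int) :
    pvAdj G node = (PySem.Dict.mk G).get? node := by
  induction G with
  | nil => rfl
  | cons p rest ih =>
    obtain ⟨n, adj⟩ := p
    rw [PySem.Dict.get?_mk_cons]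
    simp only [pvAdj, ih]

-- relaxation: A's recursion and B's fold keep equal dists and counters, A's queue sorted
-- and a permutation of B's pending
theorem pvRelax_eq (adj : List (Int × Int)) (dis : Int) :
    ∀ (dist : PySem.Dict Int Int) (qa pb : List (Int × Int)) (res : Int),
    PvSorted qa → List.Perm qa pb →
    (pvRelaxA dis adj dist qa res).1 = (adj.foldl (pvStepB dis) (dist, pb, res)).1 ∧
    (pvRelaxA dis adj dist qa res).2.2 = (adj.foldl (pvStepB dis) (dist, pb, res)).2.2 ∧
    PvSorted (pvRelaxA dis adj dist qa res).2.1 ∧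
    List.Perm (pvRelaxA dis adj dist qa res).2.1 (adj.foldl (pvStepB dis) (dist, pb, res)).2.1 := by
  induction adj with
  | nil => intro dist qa pb res hs hperm; exact ⟨rfl, rfl, hs, hperm⟩
  | cons ij adj ih =>
    intro dist qa pb res hs hperm
    obtain ⟨i, j⟩ := ij
    have hperm' : List.Perm (pvPush (dis + j, i) qa) (pb ++ [(dis + j, i)]) :=
      ((pvPush_perm _ qa).trans (hperm.cons _)).trans (List.perm_append_singleton _ pb).symm
    cases hg : PySem.Dict.get? dist i with
    | none =>
      have hD : PySem.Dict.getD dist i (dis + j + 1) = dis + j + 1 := by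
        rw [PySem.Dict.getD_eq_get?_getD, hg]; rfl
      simp only [pvRelaxA, List.foldl, pvStepB, hg, hD]
      rw [if_pos (by omega)]
      exact ih _ _ _ _ (pvPush_sorted hs) hperm'
    | some d =>
      have hD : PySem.Dict.getD dist i (dis + j + 1) = d := by
        rw [PySem.Dict.getD_eq_get?_getD, hg]; rfl
      simp only [pvRelaxA, List.foldl, pvStepB, hg, hD]
      by_cases hlt : dis + j < d
      · rw [if_pos hlt, if_pos hlt]
        exact ih _ _ _ _ (pvPush_sorted hs) hperm'
      · rw [if_neg hlt, if_neg hlt]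
        exact ih _ _ _ _ hs hperm

-- one-step unfolding of the fuelled loops (definitional)
theorem pvLoopA_succ (k : Int) (G : List (Int × List (Int × Int))) (fuel : Nat)
    (queue : List (Int × Int)) (used : PySem.Set Int) (dist : PySem.Dict Int Int) (res : Int) :
    pvLoopA k G (fuel + 1) queue used dist res =
      match queue with
      | [] => res
      | (dis, node) :: rest =>
        if node > k then res
        else
          match pvAdj G node with
          | none => pvLoopA k G fuel rest (PySem.Set.add used node) dist res
          | some adj =>
            let st := pvRelaxA dis adj dist rest res
            pvLoopA k G fuel st.2.1 (PySem.Set.add used node) st.1 st.2.2 := rfl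

theorem pvGoB_succ (k : Int) (G : List (Int × List (Int × Int))) (fuel : Nat)
    (pending : List (Int × Int)) (dist : PySem.Dict Int Int) (res : Int) :
    pvGoB k G (fuel + 1) pending dist res =
      match PySem.List.min2? pending (fun p => p.1) (fun p => p.2) with
      | none => res
      | some best =>
        if best.2 > k then res
        else
          let st := ((PySem.Dict.mk G).getD best.2 []).foldl (pvStepB best.1)
            (dist, (PySem.List.remove? pending best).getD pending, res)
          pvGoB k G fuel st.2.1 st.1 st.2.2 := rfl

theorem pvLoop_eq (k : Int) (G : List (Int × List (Int × Int))) :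
    ∀ (fuel : Nat) (qa pb : List (Int × Int)) (used : PySem.Set Int)
      (dist : PySem.Dict Int Int) (res : Int),
    PvSorted qa → List.Perm qa pb →
    pvLoopA k G fuel qa used dist res = pvGoB k G fuel pb dist res := by
  intro fuel
  induction fuel with
  | zero => intro qa pb _ _ _ _ _; rfl
  | succ fuel ih =>
    intro qa pb used dist res hs hperm
    cases qa with
    | nil =>
      have : pb = [] := hperm.symm.eq_nil
      subst this; rfl
    | cons hd t =>
      obtain ⟨dis, node⟩ := hd
      cases pb with
      | nil => exact absurd hperm.eq_nil (by simp)
      | cons p ps =>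
        have hmin := pvMin2_head hs hperm
        obtain ⟨hrem, hpend⟩ := pvRemove_perm_tail hperm
        simp only [pvLoopA_succ, pvGoB_succ, hmin, hrem]
        split
        · rfl
        · have ht : PvSorted t := (List.pairwise_cons.mp hs).2
          have hadjE : ((PySem.Dict.mk G).getD node []) = (pvAdj G node).getD [] := by
            rw [pvAdj_eq_get?, PySem.Dict.getD_eq_get?_getD]
          cases hadj : pvAdj G node with
          | none =>
            simp only [hadjE, hadj, Option.getD, List.foldl]
            exact ih t ((p :: ps).erase (dis, node)) _ dist res ht hpend
          | some adj =>
            simp only [hadjE, hadj, Option.getD]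
            obtain ⟨h1, h2, h3, h4⟩ :=
              pvRelax_eq adj dis dist t ((p :: ps).erase (dis, node)) res ht hpend
            rw [h1, h2]
            exact ih _ _ _ _ _ h3 h4

-- ===== VERDICT (by name: the statement is the Claim_ definition above) =====
theorem func_spec : Claim_equal_func := by
  intro s k G _
  unfold Spec_func func func_alt
  apply pvLoop_eq
  · simp [pvPush, PvSorted]
  · simp [pvPush]
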